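-- pv_equiv track=rewrite | github.com/Burugi/Algorithms | Brute force/재귀/14889.py | solve
-- ===== SOURCE A (Python) =====
-- from itertools import combinations
--
-- def calculate_team_score(team, S):
--     score = 0
--     for i in range(len(team)):
--         for j in range(i+1, len(team)):
--             score += S[team[i]][team[j]] + S[team[j]][team[i]]
--     return score
--
-- def solve(N, S):
--     players = range(N)
--     min_diff = float('inf')
--
--     for team in combinations(players, N//2):
--         team1 = list(team)
--         # 이렇게 set으로 조합을 빼는 게 가능하구나
--         team2 = list(set(players) - set(team1))
--
--         score1 = calculate_team_score(team1, S)
--         score2 = calculate_team_score(team2, S)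
--
--         diff = abs(score1 - score2)
--         if diff < min_diff:
--             min_diff = diff
--
--     return min_diff
-- ===== SOURCE B (Python) =====
-- def solve(N, S):
--     half = N // 2
--
--     def pair_sum(x, team):
--         return sum(S[x][y] + S[y][x] for y in team)
--
--     def rec(rest, team1, team2, s1, s2, best):
--         if not rest:
--             d = abs(s1 - s2)
--             return d if best is None or d < best else best
--         x, tail = rest[0], rest[1:]
--         if len(team1) < half:
--             best = rec(tail, team1 + [x], team2, s1 + pair_sum(x, team1), s2, best)
--         if len(team2) < N - half:
--             best = rec(tail, team1, team2 + [x], s1, s2 + pair_sum(x, team2), best)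
--         return best
--
--     res = rec(list(range(N)), [], [], 0, 0, None)
--     return res if res is not None else float('inf')
-- ===== Notes on version B (the rewrite author's own statement) =====
-- stated objective: alternative
-- what changed: Replaces the itertools.combinations enumeration (which rebuilds each team via a set difference and rescores both teams with a quadratic double loop per split) by a recursive backtracking over the player list that carries both partial teams and accumulates their scores incrementally at each placement.
import Mathlib
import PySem

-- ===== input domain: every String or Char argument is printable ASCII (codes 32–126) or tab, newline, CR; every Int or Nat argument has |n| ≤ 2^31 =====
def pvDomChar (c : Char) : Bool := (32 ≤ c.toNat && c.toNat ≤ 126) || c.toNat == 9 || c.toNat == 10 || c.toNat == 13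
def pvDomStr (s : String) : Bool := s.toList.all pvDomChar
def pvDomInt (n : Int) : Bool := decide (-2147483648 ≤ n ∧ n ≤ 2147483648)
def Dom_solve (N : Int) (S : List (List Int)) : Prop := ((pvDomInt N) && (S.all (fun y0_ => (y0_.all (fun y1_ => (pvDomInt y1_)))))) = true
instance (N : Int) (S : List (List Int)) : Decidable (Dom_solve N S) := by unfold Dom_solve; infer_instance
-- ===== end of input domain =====

-- B replaces the itertools.combinations enumeration with recursive backtracking over the player
-- list that carries both partial teams and accumulates their scores incrementally instead of
-- rescoring each split with a double loop (objective: alternative algorithm, same results).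

-- S[a][b]; exact for in-range indices, which Pre_solve guarantees (Python raises IndexError otherwise)
def pvSget (S : List (List Int)) (a b : Int) : Int :=
  PySem.List.pyGetD (PySem.List.pyGetD S a []) b 0

-- 'if diff < min_diff: min_diff = diff' with min_diff initially float('inf') (= none)
def pvMinStep (best : Option Int) (d : Int) : Option Int :=
  match best with
  | none => some d
  | some m => if d < m then some d else some m

-- ===== PORT A =====
def calcTeamScore (team : List Int) (S : List (List Int)) : Int :=
  (PySem.List.pyRange 0 (PySem.List.len team) 1).foldl (fun score i =>
    (PySem.List.pyRange (i + 1) (PySem.List.len team) 1).foldl (fun score j =>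
      score + (pvSget S (PySem.List.pyGetD team i 0) (PySem.List.pyGetD team j 0)
             + pvSget S (PySem.List.pyGetD team j 0) (PySem.List.pyGetD team i 0))) score) 0

-- itertools.combinations(xs, k), lexicographic order
def pvCombos : List Int → Nat → List (List Int)
  | _, 0 => [[]]
  | [], _ + 1 => []
  | x :: xs, k + 1 => (pvCombos xs k).map (fun c => x :: c) ++ pvCombos xs (k + 1)

def solve (N : Int) (S : List (List Int)) : Int :=
  let players := PySem.List.pyRange 0 N 1
  let res := (pvCombos players (PySem.Int.floordiv N 2).toNat).foldl
    (fun best team1 =>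
      -- list(set(players) - set(team1)): ascending order (small nonneg ints; score is order-independent anyway)
      let team2 := players.filter (fun p => !(team1.contains p))
      pvMinStep best (|calcTeamScore team1 S - calcTeamScore team2 S|)) none
  match res with
  | some v => v
  | none => 0   -- Python: float('inf'); unreachable under Pre_solve (0 ≤ N)

-- ===== PORT B =====
-- sum(S[x][y] + S[y][x] for y in team)
def pvPairSum (S : List (List Int)) (x : Int) (team : List Int) : Int :=
  (team.map (fun y => pvSget S x y + pvSget S y x)).sum

def pvRec (S : List (List Int)) (N half : Int) :
    List Int → List Int → List Int → Int → Int → Option Int → Option Int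
  | [], _t1, _t2, s1, s2, best => pvMinStep best (|s1 - s2|)
  | x :: tail, t1, t2, s1, s2, best =>
      let best1 := if (t1.length : Int) < half then
          pvRec S N half tail (t1 ++ [x]) t2 (s1 + pvPairSum S x t1) s2 best
        else best
      if (t2.length : Int) < N - half then
          pvRec S N half tail t1 (t2 ++ [x]) s1 (s2 + pvPairSum S x t2) best1
        else best1

def solve_alt (N : Int) (S : List (List Int)) : Int :=
  let half := PySem.Int.floordiv N 2
  match pvRec S N half (PySem.List.pyRange 0 N 1) [] [] 0 0 none with
  | some v => v
  | none => 0   -- Source B: float('inf') fallback; unreachable from this call under Pre_solve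

-- ===== PRECONDITION & SPEC =====
-- Exactly where Python A returns: N ≥ 0 (combinations raises ValueError for N < 0) and, as soon as
-- some split has a team with ≥ 2 players (N ≥ 3), every pair is scored, so the first N rows must
-- exist and row i must reach index N-1 (row N-1 only index N-2); else IndexError.
def Pre_solve (N : Int) (S : List (List Int)) : Prop :=
  0 ≤ N ∧ (3 ≤ N → ((N ≤ (S.length : Int)) ∧ ∀ i : Nat, i < N.toNat →
    (if (i : Int) + 1 = N then N - 1 else N) ≤ ((S.getD i []).length : Int)))
instance (N : Int) (S : List (List Int)) : Decidable (Pre_solve N S) := by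
  unfold Pre_solve; infer_instance

def pvWitness_solve : Int × List (List Int) :=
  (4, [[0, 1, 2, 3], [1, 0, 3, 4], [2, 3, 0, 1], [4, 3, 2, 0]])

def Spec_solve (N : Int) (S : List (List Int)) (out : Int) : Prop := out = solve_alt N S
instance (N : Int) (S : List (List Int)) (out : Int) : Decidable (Spec_solve N S out) := by unfold Spec_solve; infer_instance

-- ===== CLAIM (what is proved, stated in full; the proofs are below) =====
def Claim_equal_solve : Prop := ∀ (N : Int) (S : List (List Int)), Dom_solve N S → Pre_solve N S → Spec_solve N S (solve N S)

-- ===== LEMMAS AND PROOFS =====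

-- structural reference score: head paired with every later player, then recurse
def pvScore (S : List (List Int)) : List Int → Int
  | [] => 0
  | x :: xs => pvPairSum S x xs + pvScore S xs

lemma pvScore_append_singleton (S : List (List Int)) (t : List Int) (x : Int) :
    pvScore S (t ++ [x]) = pvScore S t + pvPairSum S x t := by
  induction t with
  | nil => simp [pvScore, pvPairSum]
  | cons a t ih =>
      simp only [List.cons_append, pvScore, ih, pvPairSum, List.map_append, List.sum_append,
        List.map_cons, List.sum_cons, List.map_nil, List.sum_nil]
      ring

lemma pvCombos_eq_nil_of_lt : ∀ (xs : List Int) (k : Nat), xs.length < k → pvCombos xs k = [] := by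
  intro xs
  induction xs with
  | nil => intro k hk; cases k with | zero => omega | succ k => rfl
  | cons x xs ih =>
      intro k hk
      cases k with
      | zero => omega
      | succ k =>
          simp only [pvCombos, ih k (by simpa using hk), ih (k + 1) (by simp at hk ⊢; omega),
            List.map_nil, List.append_nil]

lemma mem_of_mem_pvCombos : ∀ (xs : List Int) (k : Nat) (c : List Int), c ∈ pvCombos xs k →
    ∀ a ∈ c, a ∈ xs := by
  intro xs
  induction xs with
  | nil =>
      intro k c hc
      cases k with
      | zero => simp [pvCombos] at hc; simp [hc]
      | succ k => simp [pvCombos] at hc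
  | cons x xs ih =>
      intro k c hc a ha
      cases k with
      | zero => simp [pvCombos] at hc; simp [hc] at ha
      | succ k =>
          simp only [pvCombos, List.mem_append, List.mem_map] at hc
          rcases hc with ⟨c', hc', rfl⟩ | hc
          · rcases List.mem_cons.mp ha with rfl | ha
            · exact List.mem_cons_self
            · exact List.mem_cons_of_mem _ (ih k c' hc' a ha)
          · exact List.mem_cons_of_mem _ (ih (k + 1) c hc a ha)

-- the backtracking recursion folds pvMinStep over exactly the combinations enumeration
lemma pvRec_eq_foldl (S : List (List Int)) (N half : Int) :
    ∀ (rest : List Int), rest.Nodup → ∀ (t1 t2 : List Int) (b : Option Int) (k j : Nat),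
    (t1.length : Int) + k = half → (t2.length : Int) + j = N - half →
    rest.length = k + j →
    pvRec S N half rest t1 t2 (pvScore S t1) (pvScore S t2) b
      = (pvCombos rest k).foldl (fun best c =>
          pvMinStep best (|pvScore S (t1 ++ c)
            - pvScore S (t2 ++ rest.filter (fun p => !(c.contains p)))|)) b := by
  intro rest
  induction rest with
  | nil =>
      intro _ t1 t2 b k j hk hj hlen
      have hk0 : k = 0 := by simp at hlen; omega
      subst hk0
      simp [pvRec, pvCombos]
  | cons x tail ih =>
      intro hnd t1 t2 b k j hk hj hlen
      have hxtail : x ∉ tail := (List.nodup_cons.mp hnd).1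
      have hndtail : tail.Nodup := (List.nodup_cons.mp hnd).2
      simp only [List.length_cons] at hlen
      cases k with
      | zero =>
          -- team1 is full: x must go to team2
          have hg1 : ¬ ((t1.length : Int) < half) := by omega
          have hg2 : (t2.length : Int) < N - half := by omega
          have hj' : ∃ j', j = j' + 1 := ⟨tail.length, by omega⟩
          obtain ⟨j', rfl⟩ := hj'
          simp only [pvRec, if_neg hg1, if_pos hg2]
          rw [show pvScore S t2 + pvPairSum S x t2 = pvScore S (t2 ++ [x]) from
              (pvScore_append_singleton S t2 x).symm,
            ih hndtail t1 (t2 ++ [x]) b 0 j' (by omega) (by simp; omega) (by omega)]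
          simp [pvCombos, List.filter_true, List.append_assoc]
      | succ k' =>
          have hg1 : (t1.length : Int) < half := by omega
          simp only [pvRec, if_pos hg1]
          rw [show pvScore S t1 + pvPairSum S x t1 = pvScore S (t1 ++ [x]) from
              (pvScore_append_singleton S t1 x).symm,
            ih hndtail (t1 ++ [x]) t2 b k' j (by simp; omega) (by omega) (by omega)]
          have hmapfold : ∀ (b' : Option Int),
              (pvCombos tail k').foldl (fun best c =>
                pvMinStep best (|pvScore S ((t1 ++ [x]) ++ c)
                  - pvScore S (t2 ++ tail.filter (fun p => !(c.contains p)))|)) b'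
              = ((pvCombos tail k').map (fun c => x :: c)).foldl (fun best c =>
                pvMinStep best (|pvScore S (t1 ++ c)
                  - pvScore S (t2 ++ (x :: tail).filter (fun p => !(c.contains p)))|)) b' := by
            intro b'
            rw [List.foldl_map]
            apply PySem.List.foldl_congr_mem
            intro best c hc
            have hxc : x ∉ c := fun hx => hxtail (mem_of_mem_pvCombos tail k' c hc x hx)
            have happ : t1 ++ [x] ++ c = t1 ++ x :: c := by simp
            have hfil2 : (x :: tail).filter (fun p => !((x :: c).contains p))
                = tail.filter (fun p => !(c.contains p)) := by
              rw [List.filter_cons_of_neg (by simp)]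
              apply List.filter_congr
              intro p hp
              have hpx : p ≠ x := fun h => hxtail (h ▸ hp)
              simp [hpx]
            rw [happ, hfil2]
          cases j with
          | zero =>
              -- team2 is full: the whole tail must go to team1
              have hg2 : ¬ ((t2.length : Int) < N - half) := by omega
              simp only [if_neg hg2]
              rw [hmapfold b]
              have htl : tail.length < k' + 1 := by omega
              simp [pvCombos, pvCombos_eq_nil_of_lt tail (k' + 1) htl]
          | succ j' =>
              have hg2 : (t2.length : Int) < N - half := by omega
              simp only [if_pos hg2]
              rw [show pvScore S t2 + pvPairSum S x t2 = pvScore S (t2 ++ [x]) from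
                  (pvScore_append_singleton S t2 x).symm,
                ih hndtail t1 (t2 ++ [x]) _ (k' + 1) j' (by omega) (by simp; omega) (by omega)]
              simp only [pvCombos, List.foldl_append]
              rw [hmapfold b]
              apply PySem.List.foldl_congr_mem
              intro best c hc
              have hxc : x ∉ c := fun hx => hxtail (mem_of_mem_pvCombos tail (k' + 1) c hc x hx)
              have hfil : (x :: tail).filter (fun p => !(c.contains p))
                  = x :: tail.filter (fun p => !(c.contains p)) :=
                List.filter_cons_of_pos (by simp [hxc])
              have happ : t2 ++ [x] ++ tail.filter (fun p => !(c.contains p))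
                  = t2 ++ x :: tail.filter (fun p => !(c.contains p)) := by simp
              rw [hfil, happ]

-- the indexed double loop of calculate_team_score computes pvScore
lemma calc_eq_pvScore (S : List (List Int)) (team : List Int) :
    calcTeamScore team S = pvScore S team := by
  unfold calcTeamScore
  have hinner : ∀ (score : Int) (i : Int), 0 ≤ i →
      (PySem.List.pyRange (i + 1) (PySem.List.len team) 1).foldl (fun score j =>
        score + (pvSget S (PySem.List.pyGetD team i 0) (PySem.List.pyGetD team j 0)
               + pvSget S (PySem.List.pyGetD team j 0) (PySem.List.pyGetD team i 0))) score
      = score + ((team.drop (i + 1).toNat).map (fun y =>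
          pvSget S (PySem.List.pyGetD team i 0) y + pvSget S y (PySem.List.pyGetD team i 0))).sum := by
    intro score i hi
    have h1 := PySem.List.foldl_pyRange_pyGetD team (0 : Int)
      (fun acc y => acc + (pvSget S (PySem.List.pyGetD team i 0) y
        + pvSget S y (PySem.List.pyGetD team i 0))) score (a := i + 1) (by omega)
    have h2 := PySem.List.foldl_add (team.drop (i + 1).toNat)
      (fun y => pvSget S (PySem.List.pyGetD team i 0) y
        + pvSget S y (PySem.List.pyGetD team i 0)) score
    exact h1.trans h2
  refine Eq.trans (PySem.List.foldl_congr_mem (PySem.List.pyRange 0 (PySem.List.len team) 1) _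
    (fun score i => score + ((team.drop (i + 1).toNat).map (fun y =>
      pvSget S (PySem.List.pyGetD team i 0) y
        + pvSget S y (PySem.List.pyGetD team i 0))).sum) 0
    (fun acc i hi => hinner acc i (PySem.List.mem_pyRange_one.mp hi).1)) ?_
  rw [PySem.List.foldl_add]
  rw [Int.zero_add]
  -- switch from Int indices (pyRange) to Nat indices (List.range), then induct on team
  rw [PySem.List.pyRange_one]
  simp only [PySem.List.len_eq, Int.sub_zero, Int.toNat_natCast, List.map_map,
    Function.comp_def]
  have key : ∀ (t : List Int),
      ((List.range t.length).map (fun (k : Nat) =>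
        ((t.drop ((0 + (k : Int) + 1)).toNat).map (fun y =>
          pvSget S (PySem.List.pyGetD t (0 + (k : Int)) 0) y
            + pvSget S y (PySem.List.pyGetD t (0 + (k : Int)) 0))).sum)).sum = pvScore S t := by
    intro t
    induction t with
    | nil => simp [pvScore]
    | cons a t iht =>
        rw [List.length_cons, List.range_succ_eq_map]
        simp only [List.map_cons, List.sum_cons, List.map_map, Function.comp_def,
          Nat.succ_eq_add_one]
        have hterm0 : (((a :: t).drop (((0:Int) + ((0:Nat):Int) + 1)).toNat).map (fun y =>
            pvSget S (PySem.List.pyGetD (a :: t) ((0:Int) + ((0:Nat):Int)) 0) y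
              + pvSget S y (PySem.List.pyGetD (a :: t) ((0:Int) + ((0:Nat):Int)) 0))).sum
            = pvPairSum S a t := by
          simp [pvPairSum]
        have hshift : ∀ k : Nat,
            (((a :: t).drop (((0:Int) + ((k + 1 : Nat) : Int) + 1)).toNat).map (fun y =>
              pvSget S (PySem.List.pyGetD (a :: t) ((0:Int) + ((k + 1 : Nat) : Int)) 0) y
                + pvSget S y (PySem.List.pyGetD (a :: t) ((0:Int) + ((k + 1 : Nat) : Int)) 0))).sum
            = ((t.drop ((0 + (k : Int) + 1)).toNat).map (fun y =>
              pvSget S (PySem.List.pyGetD t (0 + (k : Int)) 0) y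
                + pvSget S y (PySem.List.pyGetD t (0 + (k : Int)) 0))).sum := by
          intro k
          have hd : (((0:Int) + ((k + 1 : Nat) : Int) + 1)).toNat = ((0 + (k : Int) + 1)).toNat + 1 := by
            omega
          have hg : PySem.List.pyGetD (a :: t) ((0:Int) + ((k + 1 : Nat) : Int)) 0
              = PySem.List.pyGetD t (0 + (k : Int)) 0 := by
            rw [show (0 : Int) + ((k + 1 : Nat) : Int) = (((k + 1 : Nat) : Nat) : Int) by omega,
              show (0 : Int) + (k : Int) = ((k : Nat) : Int) by omega,
              PySem.List.pyGetD_natCast, PySem.List.pyGetD_natCast]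
            exact List.getD_cons_succ
          rw [hd, hg, List.drop_succ_cons]
        have hmap : ((List.range t.length).map (fun (x : Nat) =>
            (((a :: t).drop (((0:Int) + ((x + 1 : Nat) : Int) + 1)).toNat).map (fun y =>
              pvSget S (PySem.List.pyGetD (a :: t) ((0:Int) + ((x + 1 : Nat) : Int)) 0) y
                + pvSget S y (PySem.List.pyGetD (a :: t) ((0:Int) + ((x + 1 : Nat) : Int)) 0))).sum)).sum
            = ((List.range t.length).map (fun (k : Nat) =>
              ((t.drop ((0 + (k : Int) + 1)).toNat).map (fun y =>
                pvSget S (PySem.List.pyGetD t (0 + (k : Int)) 0) y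
                  + pvSget S y (PySem.List.pyGetD t (0 + (k : Int)) 0))).sum)).sum := by
          apply congrArg
          apply List.map_congr_left
          intro k _
          exact hshift k
        rw [hterm0, hmap, iht, pvScore]
  exact key team

-- ===== VERDICT (by name: the statement is the Claim_ definition above) =====
theorem solve_spec : Claim_equal_solve := by
  intro N S _hDom hPre
  obtain ⟨hN, -⟩ := hPre
  unfold Spec_solve solve solve_alt
  have hhalf : PySem.Int.floordiv N 2 = N / 2 := PySem.Int.floordiv_eq_ediv_of_pos (by omega)
  have hb1 : 0 ≤ PySem.Int.floordiv N 2 := by rw [hhalf]; omega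
  have hb2 : PySem.Int.floordiv N 2 ≤ N := by rw [hhalf]; omega
  have hlen : (PySem.List.pyRange 0 N 1).length
      = (PySem.Int.floordiv N 2).toNat + (N - PySem.Int.floordiv N 2).toNat := by
    rw [PySem.List.length_pyRange_one]; omega
  have hrec := pvRec_eq_foldl S N (PySem.Int.floordiv N 2) (PySem.List.pyRange 0 N 1)
    (PySem.List.nodup_pyRange_one 0 N) [] [] none
    (PySem.Int.floordiv N 2).toNat ((N - PySem.Int.floordiv N 2).toNat)
    (by simp; omega) (by simp; omega) hlen
  simp only [pvScore] at hrec
  dsimp only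
  rw [hrec]
  congr 1
  apply PySem.List.foldl_congr_mem
  intro best c _
  simp [calc_eq_pvScore]
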